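-- pv_equiv track=rewrite | github.com/memgonzales/aniframe-language | interpreter/mapping.py | print_display_object
-- ===== SOURCE A (Python) =====
-- START_FRAME_IDX = 0
--
-- END_FRAME_IDX = 1
--
-- SCRIPT_IDX = 2
--
-- def print_display_object(object):
--     frames = set()
--     for command in object:
--         frames.add(command[START_FRAME_IDX])
--         frames.add(command[END_FRAME_IDX])
--
--     frames = list(frames)
--     frames.sort()
--
--     final_frames = [(frames[0], frames[1])]
--     for i in range(1, len(frames) - 1):
--         final_frames.append((frames[i]+1, frames[i+1]))
--
--     final_commands = []
--     for final_frame in final_frames: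
--         start_final_frame = final_frame[START_FRAME_IDX]
--         end_final_frame = final_frame[END_FRAME_IDX]
--
--         final_commands_str = ''
--         for command in object:
--             start_frame = command[START_FRAME_IDX]
--             end_frame = command[END_FRAME_IDX]
--
--             if start_frame <= start_final_frame and end_final_frame <= end_frame:
--                 final_commands_str += command[SCRIPT_IDX]
--
--         final_commands.append(final_commands_str)
--
--     ret = ''
--     for frame, command in zip(final_frames, final_commands):
--         ret += f'if ({frame[START_FRAME_IDX]} <= frameCount && frameCount <= {frame[END_FRAME_IDX]}) {{\n'
--         ret += f'    {command}'
--         ret += '}\n'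
--
--     return ret
-- ===== SOURCE B (Python) =====
-- def _bisect_left(xs, x):
--     lo, hi = 0, len(xs)
--     while lo < hi:
--         mid = (lo + hi) // 2
--         if xs[mid] < x:
--             lo = mid + 1
--         else:
--             hi = mid
--     return lo
--
--
-- def _bisect_right(xs, x):
--     lo, hi = 0, len(xs)
--     while lo < hi:
--         mid = (lo + hi) // 2
--         if xs[mid] <= x:
--             lo = mid + 1
--         else:
--             hi = mid
--     return lo
--
--
-- def print_display_object(object):
--     fs = sorted({v for c in object for v in (c[0], c[1])})
--     starts = fs[:1] + [f + 1 for f in fs[1:-1]]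
--     ends = fs[1:]
--     buckets = [[] for _ in starts]
--     for s, e, script in object:
--         # the intervals covered by (s, e) form a contiguous index range,
--         # found by binary search on the sorted start/end boundary arrays
--         lo = _bisect_left(starts, s)
--         hi = _bisect_right(ends, e)
--         for i in range(lo, hi):
--             buckets[i].append(script)
--     out = []
--     for a, b, c in zip(starts, ends, buckets):
--         out.append(f'if ({a} <= frameCount && frameCount <= {b}) {{\n    ')
--         out.extend(c)
--         out.append('}\n')
--     return ''.join(out)
-- ===== Notes on version B (the rewrite author's own statement) =====
-- stated objective: alternative
-- what changed: B replaces A's per-interval rescan of the whole command list by binary-searching, for each command, the contiguous index range of the intervals it covers on the sorted start/end boundary arrays; buckets collect script pieces and the output is one flat join. Intended as faster (O(C log I + output) vs O(C*I)); a timing run measured only about 1.4x at the largest size, below its 1.5x bar, so no speed is claimed.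
-- crash fix: A raises IndexError whenever the commands provide fewer than two distinct frame boundary values (e.g. an empty list); B returns the empty string there. — e.g. on print_display_object([]): A raises IndexError, B returns ""
import Mathlib
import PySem

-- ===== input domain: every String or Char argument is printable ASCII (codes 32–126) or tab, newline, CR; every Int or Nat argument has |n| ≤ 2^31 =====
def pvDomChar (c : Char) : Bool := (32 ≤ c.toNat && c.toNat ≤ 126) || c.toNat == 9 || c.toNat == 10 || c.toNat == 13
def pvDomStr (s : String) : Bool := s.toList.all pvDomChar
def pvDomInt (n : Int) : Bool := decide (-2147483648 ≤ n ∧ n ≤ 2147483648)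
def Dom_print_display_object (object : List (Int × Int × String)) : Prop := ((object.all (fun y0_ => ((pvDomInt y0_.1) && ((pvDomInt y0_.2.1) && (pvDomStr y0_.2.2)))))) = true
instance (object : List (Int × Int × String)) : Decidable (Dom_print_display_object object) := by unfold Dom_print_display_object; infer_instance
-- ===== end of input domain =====

-- B finds, for each command, the contiguous index range of the intervals it covers by
-- BINARY SEARCH on the sorted start/end boundary arrays and appends its script only to
-- those buckets, instead of A's rescan of the whole command list for every interval.

-- ===== PORT A =====
def print_display_object (object : List (Int × Int × String)) : String :=
  let frames : PySem.Set Int :=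
    object.foldl (fun s c => PySem.Set.add (PySem.Set.add s c.1) c.2.1) PySem.Set.empty
  let fs : List Int := PySem.List.sorted frames (fun x => x) false
  -- frames[0] / frames[1] raise IndexError when fewer than two distinct frame values exist:
  -- those inputs are excluded by Pre_
  match PySem.List.pyGet? fs 0, PySem.List.pyGet? fs 1 with
  | some f0, some f1 =>
    let finalFrames : List (Int × Int) :=
      (f0, f1) :: (PySem.List.pyRange 1 ((fs.length : Int) - 1) 1).map
        (fun i => (PySem.List.pyGetD fs i 0 + 1, PySem.List.pyGetD fs (i + 1) 0))
    let finalCommands : List String :=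
      finalFrames.map (fun ff =>
        object.foldl (fun acc c =>
          if c.1 ≤ ff.1 ∧ ff.2 ≤ c.2.1 then acc ++ c.2.2 else acc) "")
    (finalFrames.zip finalCommands).foldl (fun ret p =>
      ret ++ "if (" ++ PySem.Int.toStr p.1.1 ++ " <= frameCount && frameCount <= "
        ++ PySem.Int.toStr p.1.2 ++ ") {\n" ++ "    " ++ p.2 ++ "}\n") ""
  | _, _ => ""

-- ===== PORT B =====
-- Source B's hand-written _bisect_left/_bisect_right are the standard bisect loops; they are
-- ported as PySem.List.bisectLeft / bisectRight, the prelude's ports of exactly those loops.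
def print_display_object_alt (object : List (Int × Int × String)) : String :=
  let fs : List Int :=
    PySem.List.sorted (PySem.Set.ofList (object.flatMap (fun c => [c.1, c.2.1])))
      (fun x => x) false
  let starts : List Int :=
    PySem.List.slice fs none (some 1)
      ++ (PySem.List.slice fs (some 1) (some (-1))).map (fun f => f + 1)
  let ends : List Int := PySem.List.slice fs (some 1) none
  let buckets0 : List (List String) := List.replicate starts.length []
  let buckets : List (List String) := object.foldl (fun bks c =>
    let lo := PySem.List.bisectLeft starts c.1
    let hi := PySem.List.bisectRight ends c.2.1
    (List.range' lo (hi - lo)).foldl (fun b i => b.modify i (fun v => v ++ [c.2.2])) bks) buckets0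
  let out : List String := (starts.zip (ends.zip buckets)).foldl (fun acc t =>
    ((acc ++ ["if (" ++ PySem.Int.toStr t.1 ++ " <= frameCount && frameCount <= "
      ++ PySem.Int.toStr t.2.1 ++ ") {\n    "]) ++ t.2.2) ++ ["}\n"]) []
  PySem.Str.join "" out

-- ===== PRECONDITION & SPEC =====
-- Pre_ excludes exactly the inputs with fewer than two distinct frame boundary values
-- (empty object, or all starts and ends equal), on which Python A raises IndexError.
def Pre_print_display_object (object : List (Int × Int × String)) : Prop :=
  2 ≤ (PySem.List.dedup (object.flatMap (fun c => [c.1, c.2.1]))).length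
instance (object : List (Int × Int × String)) : Decidable (Pre_print_display_object object) := by
  unfold Pre_print_display_object; infer_instance

def pvWitness_print_display_object : (List (Int × Int × String)) := [(0, 3, "a();\n"), (1, 3, "b();\n")]

-- A raises IndexError whenever the commands provide fewer than two distinct frame
-- boundary values; B returns the empty script there.
def Raises_print_display_object (object : List (Int × Int × String)) : Prop :=
  (PySem.List.dedup (object.flatMap (fun c => [c.1, c.2.1]))).length < 2
instance (object : List (Int × Int × String)) : Decidable (Raises_print_display_object object) := by
  unfold Raises_print_display_object; infer_instance

def pvRaiseWitness_print_display_object : (List (Int × Int × String)) := []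
def pvRaiseWitnessOut_print_display_object : String := ""

def Spec_print_display_object (object : List (Int × Int × String)) (out : String) : Prop := out = print_display_object_alt object
instance (object : List (Int × Int × String)) (out : String) : Decidable (Spec_print_display_object object out) := by unfold Spec_print_display_object; infer_instance

-- ===== CLAIM (what is proved, stated in full; the proofs are below) =====
def Claim_equal_print_display_object : Prop := ∀ (object : List (Int × Int × String)), Dom_print_display_object object → Pre_print_display_object object → Spec_print_display_object object (print_display_object object)

def Claim_raises_print_display_object : Prop := (∀ (object : List (Int × Int × String)), Dom_print_display_object object → Raises_print_display_object object → ¬ Pre_print_display_object object) ∧ (Dom_print_display_object (pvRaiseWitness_print_display_object) ∧ Raises_print_display_object (pvRaiseWitness_print_display_object) ∧ print_display_object_alt (pvRaiseWitness_print_display_object) = pvRaiseWitnessOut_print_display_object)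

-- ===== LEMMAS AND PROOFS =====

-- A's set-building loop (two adds per command) is the set of the flattened boundary list.
lemma pv_set_fold_eq (object : List (Int × Int × String)) (s : PySem.Set Int) :
    object.foldl (fun s c => PySem.Set.add (PySem.Set.add s c.1) c.2.1) s
      = (object.flatMap (fun c => [c.1, c.2.1])).foldl PySem.Set.add s := by
  induction object generalizing s with
  | nil => rfl
  | cons c t ih => simp [List.flatMap_cons, ih]

lemma pv_join_nil : PySem.Str.join "" ([] : List String) = "" := by
  rw [← String.toList_inj]
  simp [PySem.Str.toList_join, PySem.Chars.join_nil]

lemma pv_join_empty_cons (x : String) (xs : List String) :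
    PySem.Str.join "" (x :: xs) = x ++ PySem.Str.join "" xs := by
  rw [← String.toList_inj]
  cases xs <;>
    simp [PySem.Str.toList_join, PySem.Chars.join_nil, PySem.Chars.join_singleton,
      PySem.Chars.join_cons_cons, String.toList_append]

lemma pv_lit_merge : (") {\n" : String) ++ "    " = ") {\n    " := rfl

-- A's string-accumulating output loop is ''.join of the formatted chunk list
lemma pv_foldjoin (l : List ((Int × Int) × String)) (s : String) :
    l.foldl (fun ret p =>
        ret ++ "if (" ++ PySem.Int.toStr p.1.1 ++ " <= frameCount && frameCount <= "
          ++ PySem.Int.toStr p.1.2 ++ ") {\n" ++ "    " ++ p.2 ++ "}\n") s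
      = s ++ PySem.Str.join "" (l.map (fun q =>
          "if (" ++ PySem.Int.toStr q.1.1 ++ " <= frameCount && frameCount <= "
            ++ PySem.Int.toStr q.1.2 ++ ") {\n    " ++ q.2 ++ "}\n")) := by
  induction l generalizing s with
  | nil => simp [pv_join_nil, String.append_empty]
  | cons p t ih =>
    simp only [List.foldl_cons, List.map_cons, pv_join_empty_cons, ih]
    rw [← pv_lit_merge]
    simp [String.append_assoc]

-- the index-loop over range(1, len(fs)-1) builds the tail pairs of consecutive fs entries
lemma pv_tail_intervals (fs : List Int) :
    (PySem.List.pyRange 1 ((fs.length : Int) - 1) 1).map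
        (fun i => (PySem.List.pyGetD fs i 0 + 1, PySem.List.pyGetD fs (i + 1) 0))
      = ((fs.zip fs.tail).tail).map (fun ab => (ab.1 + 1, ab.2)) := by
  apply List.ext_getElem
  · simp only [List.length_map, PySem.List.length_pyRange_one, List.length_tail,
      List.length_zip]
    omega
  · intro j h1 h2
    have hlen : j + 2 < fs.length := by
      simp [PySem.List.length_pyRange_one] at h1
      omega
    have e1 : (1 : Int) + (j : Int) = ((j + 1 : Nat) : Int) := by push_cast; ring
    simp only [List.getElem_map, PySem.List.getElem_pyRange_one, e1,
      PySem.List.pyGetD_natCast, List.getElem_tail, List.getElem_zip]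
    have e3 : ((j + 1 : Nat) : Int) + 1 = ((j + 2 : Nat) : Int) := by push_cast; ring
    have g1 : fs.getD (j + 1) 0 = fs[j + 1]'(by omega) := List.getD_eq_getElem fs 0 (by omega)
    have g2 : fs.getD (j + 2) 0 = fs[j + 2]'(by omega) := List.getD_eq_getElem fs 0 (by omega)
    simp only [e3, PySem.List.pyGetD_natCast, g1, g2]

-- xs[0] / xs[1] on a list with enough elements
lemma pv_pyGet?_cons_zero {A : Type} (a : A) (l : List A) :
    PySem.List.pyGet? (a :: l) 0 = some a := by
  have h : (0 : Int) <= (l.length : Int) := by positivity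
  simp [PySem.List.pyGet?, PySem.List.pyIdx?, h]

lemma pv_pyGet?_cons_one {A : Type} (a b : A) (l : List A) :
    PySem.List.pyGet? (a :: b :: l) 1 = some b := by
  have h : (0 : Int) <= (l.length : Int) := by positivity
  simp [PySem.List.pyGet?, PySem.List.pyIdx?, h]

-- fs[1:-1] on a ≥2-element list drops the first and last entries
lemma pv_slice_mid (f0 f1 : Int) (rest : List Int) :
    PySem.List.slice (f0 :: f1 :: rest) (some 1) (some (-1)) = (f1 :: rest).dropLast := by
  have h : ¬((rest.length : Int) + 1 < 0) := by omega
  simp [PySem.List.slice, PySem.List.clampIdx, List.dropLast_eq_take, h]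

-- the for-loop 'for i in range(lo, hi): buckets[i].append(s)' keeps the length …
lemma pv_modify_range_len {α : Type} (f : α → α) (bks : List α) (lo k : Nat) :
    ((List.range' lo k).foldl (fun b i => b.modify i f) bks).length
      = bks.length := by
  induction k with
  | zero => rfl
  | succ n ih =>
    rw [List.range'_concat, List.foldl_append]
    simp [ih]

-- … and updates exactly the cells at the indices lo ≤ i < lo + k
lemma pv_modify_range_get {α : Type} (f : α → α) (bks : List α) (lo k : Nat) (i : Nat)
    (h : i < ((List.range' lo k).foldl (fun b i => b.modify i f) bks).length) :
    ((List.range' lo k).foldl (fun b i => b.modify i f) bks)[i]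
      = if lo ≤ i ∧ i < lo + k then f (bks[i]'(by rw [pv_modify_range_len] at h; exact h))
        else bks[i]'(by rw [pv_modify_range_len] at h; exact h) := by
  induction k with
  | zero =>
    simp only [List.range'_zero, List.foldl_nil]
    have hn : ¬ (lo ≤ i ∧ i < lo + 0) := by omega
    rw [if_neg hn]
  | succ n ih =>
    have h' : i < ((List.range' lo n).foldl (fun b i => b.modify i f) bks).length := by
      rw [pv_modify_range_len]
      rw [pv_modify_range_len] at h
      exact h
    simp only [List.range'_concat, List.foldl_append, List.foldl_cons, List.foldl_nil,
      List.getElem_modify]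
    rw [ih h']
    split_ifs with h1 h2 h3 h4 h5 <;> first | rfl | omega

-- binary-search range membership = A's coverage condition, on sorted boundary arrays
lemma pv_cover_iff (starts ends : List Int) (hlen : ends.length = starts.length)
    (hs : List.Pairwise (fun a b => a ≤ b) starts)
    (he : List.Pairwise (fun a b => a ≤ b) ends)
    (s e : Int) (i : Nat) (hi : i < starts.length) :
    (PySem.List.bisectLeft starts s ≤ i ∧
      i < PySem.List.bisectLeft starts s
          + (PySem.List.bisectRight ends e - PySem.List.bisectLeft starts s))
      ↔ (s ≤ starts[i] ∧ ends[i]'(by omega) ≤ e) := by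
  obtain ⟨hL1, hL2, hL3⟩ := PySem.List.bisectLeft_spec starts s hs
  obtain ⟨hR1, hR2, hR3⟩ := PySem.List.bisectRight_spec ends e he
  constructor
  · rintro ⟨h1, h2⟩
    have h3 : i < PySem.List.bisectRight ends e := by omega
    exact ⟨hL3 i hi h1, hR2 i (by omega) h3⟩
  · rintro ⟨h1, h2⟩
    have h3 : PySem.List.bisectLeft starts s ≤ i := by
      by_contra hcon
      exact absurd h1 (not_le.mpr (hL2 i hi (by omega)))
    have h4 : i < PySem.List.bisectRight ends e := by
      by_contra hcon
      exact absurd h2 (not_le.mpr (hR3 i (by omega) (by omega)))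
    exact ⟨h3, by omega⟩

-- one command's bucket update, on buckets of the form 'map g', is again a map
lemma pv_step_map (starts ends : List Int) (hlen : ends.length = starts.length)
    (hs : List.Pairwise (fun a b => a ≤ b) starts)
    (he : List.Pairwise (fun a b => a ≤ b) ends)
    (g : Int × Int → List String) (c : Int × Int × String) :
    (List.range' (PySem.List.bisectLeft starts c.1)
        (PySem.List.bisectRight ends c.2.1 - PySem.List.bisectLeft starts c.1)).foldl
        (fun b i => b.modify i (fun v => v ++ [c.2.2])) ((starts.zip ends).map g)
      = (starts.zip ends).map
          (fun iv => if c.1 ≤ iv.1 ∧ iv.2 ≤ c.2.1 then g iv ++ [c.2.2] else g iv) := by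
  apply List.ext_getElem
  · rw [pv_modify_range_len]
    simp
  · intro i h1 h2
    have hi : i < starts.length := by
      simp [List.length_zip] at h2
      omega
    have hi2 : i < ends.length := by omega
    rw [pv_modify_range_get]
    have hcov := pv_cover_iff starts ends hlen hs he c.1 c.2.1 i hi
    simp only [List.getElem_map, List.getElem_zip]
    by_cases hc : c.1 ≤ starts[i] ∧ ends[i] ≤ c.2.1
    · rw [if_pos (hcov.mpr hc), if_pos hc]
    · rw [if_neg (fun hx => hc (hcov.mp hx)), if_neg hc]

-- the whole command loop computes, per interval, A's per-interval fold
lemma pv_buckets (object : List (Int × Int × String)) (starts ends : List Int)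
    (hlen : ends.length = starts.length)
    (hs : List.Pairwise (fun a b => a ≤ b) starts)
    (he : List.Pairwise (fun a b => a ≤ b) ends)
    (g : Int × Int → List String) :
    object.foldl (fun bks c =>
        (List.range' (PySem.List.bisectLeft starts c.1)
          (PySem.List.bisectRight ends c.2.1 - PySem.List.bisectLeft starts c.1)).foldl
          (fun b i => b.modify i (fun v => v ++ [c.2.2])) bks) ((starts.zip ends).map g)
      = (starts.zip ends).map (fun iv => object.foldl (fun acc c =>
          if c.1 ≤ iv.1 ∧ iv.2 ≤ c.2.1 then acc ++ [c.2.2] else acc) (g iv)) := by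
  induction object generalizing g with
  | nil => rfl
  | cons c t ih =>
    simp only [List.foldl_cons]
    rw [pv_step_map starts ends hlen hs he g c]
    exact ih (fun iv => if c.1 ≤ iv.1 ∧ iv.2 ≤ c.2.1 then g iv ++ [c.2.2] else g iv)

-- B's shifted-starts array zipped with the tail boundaries is A's tail interval list
lemma pv_zip_shift (f1 : Int) (rest : List Int) :
    ((f1 :: rest).dropLast.map (fun f => f + 1)).zip rest
      = ((f1 :: rest).zip rest).map (fun ab => (ab.1 + 1, ab.2)) := by
  apply List.ext_getElem
  · simp [List.length_zip]
  · intro i h1 h2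
    simp only [List.getElem_zip, List.getElem_map, List.getElem_dropLast]

-- ''.join distributes over list concatenation
lemma pv_join_append (l1 l2 : List String) :
    PySem.Str.join "" (l1 ++ l2) = PySem.Str.join "" l1 ++ PySem.Str.join "" l2 := by
  induction l1 with
  | nil => simp [pv_join_nil, String.empty_append]
  | cons x t ih => simp [pv_join_empty_cons, ih, String.append_assoc]

-- B's piece-collecting output loop (append header, extend bucket, append footer)
-- flattens to one piece list
lemma pv_out_fold {T : Type} (f : T → String) (g : T → List String) (l : List T)
    (acc : List String) :
    l.foldl (fun acc t => ((acc ++ [f t]) ++ g t) ++ ["}\n"]) acc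
      = acc ++ l.flatMap (fun t => (f t :: g t) ++ ["}\n"]) := by
  induction l generalizing acc with
  | nil => simp
  | cons t l ih =>
    simp only [List.foldl_cons, List.flatMap_cons]
    rw [ih]
    simp [List.append_assoc]

-- joining the flat piece list = joining the per-interval chunks
lemma pv_join_chunks {T : Type} (f : T → String) (g : T → List String) (l : List T) :
    PySem.Str.join "" (l.flatMap (fun t => (f t :: g t) ++ ["}\n"]))
      = PySem.Str.join "" (l.map (fun t => (f t ++ PySem.Str.join "" (g t)) ++ "}\n")) := by
  induction l with
  | nil => rfl
  | cons t l ih =>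
    simp only [List.flatMap_cons, List.map_cons]
    rw [pv_join_append, pv_join_empty_cons, List.cons_append, pv_join_empty_cons,
      pv_join_append, pv_join_empty_cons, pv_join_nil, ih]
    simp [String.append_assoc, String.append_empty]

-- a bucket's joined piece list is A's per-interval string accumulation
lemma pv_join_fold (object : List (Int × Int × String)) (a b : Int) (l : List String) :
    PySem.Str.join "" (object.foldl (fun acc c =>
        if c.1 ≤ a ∧ b ≤ c.2.1 then acc ++ [c.2.2] else acc) l)
      = object.foldl (fun acc c =>
        if c.1 ≤ a ∧ b ≤ c.2.1 then acc ++ c.2.2 else acc) (PySem.Str.join "" l) := by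
  induction object generalizing l with
  | nil => rfl
  | cons c t ih =>
    simp only [List.foldl_cons]
    by_cases hc : c.1 ≤ a ∧ b ≤ c.2.1
    · rw [if_pos hc, if_pos hc, ih, pv_join_append, pv_join_empty_cons, pv_join_nil,
        String.append_empty]
    · rw [if_neg hc, if_neg hc, ih]

-- ===== VERDICT (by name: the statement is the Claim_ definition above) =====
-- fs below is sorted(set(all boundary values)); with at least two entries A takes its main
-- branch, B's binary-searched bucket updates build A's per-interval concatenations
-- (pv_buckets + pv_cover_iff), and the two zips format the same chunk list.
theorem print_display_object_spec : Claim_equal_print_display_object := by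
  intro object _ hpre
  unfold Spec_print_display_object print_display_object print_display_object_alt
  rw [pv_set_fold_eq]
  have hof : ((object.flatMap (fun c => [c.1, c.2.1])).foldl PySem.Set.add PySem.Set.empty)
      = PySem.Set.ofList (object.flatMap (fun c => [c.1, c.2.1])) := rfl
  rw [hof]
  simp only []
  set K := object.flatMap (fun c => [c.1, c.2.1]) with hK
  set fs := PySem.List.sorted (PySem.Set.ofList K) (fun x => x) false with hfs
  have hpair : List.Pairwise (fun a b => a ≤ b) fs :=
    PySem.List.sorted_pairwise (PySem.Set.ofList K) (fun x => x)
  have hlenfs : 2 ≤ fs.length := by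
    unfold Pre_print_display_object at hpre
    rw [PySem.List.dedup_eq_ofList] at hpre
    rw [hfs, PySem.List.length_sorted]
    exact hpre
  obtain ⟨f0, f1, rest, hfs2⟩ : ∃ f0 f1 rest, fs = f0 :: f1 :: rest := by
    match fs, hlenfs with
    | f0 :: f1 :: rest, _ => exact ⟨f0, f1, rest, rfl⟩
  rw [hfs2] at hpair ⊢
  -- A takes its main branch
  rw [pv_pyGet?_cons_zero f0 (f1 :: rest), pv_pyGet?_cons_one f0 f1 rest]
  -- B's boundary slices
  rw [PySem.List.slice_to (f0 :: f1 :: rest) (by norm_num : (0:Int) ≤ 1),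
    pv_slice_mid f0 f1 rest, PySem.List.slice_from_one]
  simp only [Int.toNat_one, List.take_succ_cons, List.take_zero, List.tail_cons,
    List.singleton_append]
  set starts : List Int := f0 :: ((f1 :: rest).dropLast.map (fun f => f + 1)) with hstarts
  set ends : List Int := f1 :: rest with hends
  have hlen : ends.length = starts.length := by
    simp [hstarts, hends]
  have hs : List.Pairwise (fun a b => a ≤ b) starts := by
    rw [hstarts]
    refine List.pairwise_cons.mpr ⟨?_, ?_⟩
    · intro x hx
      obtain ⟨y, hy, rfl⟩ := List.mem_map.mp hx
      have hy2 : y ∈ f1 :: rest := List.Sublist.mem hy (List.dropLast_sublist _)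
      have := (List.pairwise_cons.mp hpair).1 y hy2
      omega
    · refine List.pairwise_map.mpr ?_
      have hsub : List.Pairwise (fun a b => a ≤ b) (f1 :: rest).dropLast :=
        ((List.pairwise_cons.mp hpair).2).sublist (List.dropLast_sublist _)
      exact hsub.imp (fun h => by omega)
  have he : List.Pairwise (fun a b => a ≤ b) ends := by
    rw [hends]
    exact (List.pairwise_cons.mp hpair).2
  -- the initial buckets are a map over the interval list
  have hrep : List.replicate starts.length ([] : List String)
      = (starts.zip ends).map (fun _ => ([] : List String)) := by
    rw [List.map_const', List.length_zip, hlen, min_self]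
  rw [hrep, pv_buckets object starts ends hlen hs he (fun _ => [])]
  -- both interval lists coincide
  have hIV : starts.zip ends
      = (f0, f1) :: (((f1 :: rest).zip rest).map (fun ab => (ab.1 + 1, ab.2))) := by
    rw [hstarts, hends]
    simp only [List.zip_cons_cons]
    rw [pv_zip_shift]
  have hA : (PySem.List.pyRange 1 (((f0 :: f1 :: rest).length : Int) - 1) 1).map
        (fun i => (PySem.List.pyGetD (f0 :: f1 :: rest) i 0 + 1,
                   PySem.List.pyGetD (f0 :: f1 :: rest) (i + 1) 0))
      = ((f1 :: rest).zip rest).map (fun ab => (ab.1 + 1, ab.2)) := by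
    have h := pv_tail_intervals (f0 :: f1 :: rest)
    simpa using h
  rw [hA, ← hIV]
  -- A's output loop is the join of the chunk list; B's piece list flattens to the same chunks
  rw [pv_foldjoin, pv_out_fold, List.nil_append, pv_join_chunks]
  have hchunks : (starts.zip (ends.zip ((starts.zip ends).map (fun iv =>
          List.foldl (fun acc c => if c.1 ≤ iv.1 ∧ iv.2 ≤ c.2.1 then acc ++ [c.2.2] else acc)
            [] object)))).map (fun t =>
        (("if (" ++ PySem.Int.toStr t.1 ++ " <= frameCount && frameCount <= "
          ++ PySem.Int.toStr t.2.1 ++ ") {\n    ") ++ PySem.Str.join "" t.2.2) ++ "}\n")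
      = ((starts.zip ends).zip ((starts.zip ends).map (fun ff =>
          List.foldl (fun acc c => if c.1 ≤ ff.1 ∧ ff.2 ≤ c.2.1 then acc ++ c.2.2 else acc)
            "" object))).map (fun q =>
        "if (" ++ PySem.Int.toStr q.1.1 ++ " <= frameCount && frameCount <= "
          ++ PySem.Int.toStr q.1.2 ++ ") {\n    " ++ q.2 ++ "}\n") := by
    apply List.ext_getElem
    · simp [List.length_zip]
    · intro i h1 h2
      simp only [List.getElem_map, List.getElem_zip]
      rw [pv_join_fold, pv_join_nil]
  rw [hchunks]
  simp

@[simp] theorem print_display_object_raises : Claim_raises_print_display_object := by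
  unfold Claim_raises_print_display_object
  constructor
  · intro object _ hr hp
    unfold Raises_print_display_object at hr
    unfold Pre_print_display_object at hp
    omega
  · exact ⟨by decide, by decide, by decide⟩
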